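-- pv_equiv track=rewrite | github.com/sofiiaavetisian/document-classification | src/invoice_rules.py | find_all_anchor_lines
-- ===== SOURCE A (Python) =====
-- from typing import List, Optional, Tuple
--
-- def find_all_anchor_lines(lines: List[str], anchors: List[str]) -> List[int]:
--     """
--     Return indices of all lines that contain any of the given anchor keywords.
--     Useful when a field anchor may appear multiple times.
--     """
--     hits = []
--     for i, line in enumerate(lines):
--         line_lower = line.lower()
--         for anchor in anchors:
--             if anchor in line_lower:
--                 hits.append(i)
--                 break
--     return hits
-- ===== SOURCE B (Python) =====
-- def find_all_anchor_lines(lines, anchors):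
--     """Anchor-outer rewrite: lowercase every line once; process the distinct
--     anchors shortest-first (the matched set does not depend on anchor order);
--     screen each anchor with one substring test against a joined string of the
--     still-unmatched lines (a conservative C-speed prefilter; a boundary-
--     spanning false positive only costs a wasted sweep), and on a hit sweep
--     the remaining lines, pruning matched ones; the collected indices are
--     sorted back into line order at the end."""
--     lowered = [line.lower() for line in lines]
--     remaining = list(enumerate(lowered))
--     big = '\x00'.join(lowered)
--     hits = []
--     for anchor in sorted(dict.fromkeys(anchors), key=len):
--         if not remaining:
--             break
--         if anchor not in big:
--             continue
--         still = []
--         for i, ll in remaining: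
--             if anchor in ll:
--                 hits.append(i)
--             else:
--                 still.append((i, ll))
--         remaining = still
--         big = '\x00'.join(p[1] for p in still)
--     return sorted(hits)
-- ===== Notes on version B (the rewrite author's own statement) =====
-- stated objective: faster
-- what changed: Inverted the loop nest: B lowercases all lines once, processes the deduplicated anchors shortest-first (order does not affect the matched set), screens each anchor with a single substring test against one joined string of the still-unmatched lines (a conservative C-speed prefilter), sweeps only on a prefilter hit while pruning matched lines, and sorts the collected indices back into line order.
import Mathlib
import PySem

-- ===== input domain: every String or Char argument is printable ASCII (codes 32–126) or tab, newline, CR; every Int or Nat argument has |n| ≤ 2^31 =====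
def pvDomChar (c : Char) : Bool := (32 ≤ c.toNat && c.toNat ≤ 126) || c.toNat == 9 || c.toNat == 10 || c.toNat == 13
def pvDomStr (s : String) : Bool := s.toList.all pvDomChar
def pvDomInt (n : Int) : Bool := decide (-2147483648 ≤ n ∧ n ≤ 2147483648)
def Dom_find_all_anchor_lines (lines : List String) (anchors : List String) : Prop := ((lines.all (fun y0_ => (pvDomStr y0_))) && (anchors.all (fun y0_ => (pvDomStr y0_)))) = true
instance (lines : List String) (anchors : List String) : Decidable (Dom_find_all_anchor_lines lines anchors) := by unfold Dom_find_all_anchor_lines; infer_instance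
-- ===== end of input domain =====

-- B inverts A's loop nest: each anchor is screened against one joined string of the
-- still-unmatched lines, swept over them only on a hit, and the hit indices are sorted
-- back into line order (return value proved identical).

-- ===== PORT A =====
-- inner 'for anchor in anchors: if anchor in line_lower: hits.append(i); break'
def pvInnerA (hits : List Int) (i : Int) (ll : String) : List String → List Int
  | [] => hits
  | a :: rest => if PySem.Str.isIn a ll then hits ++ [i] else pvInnerA hits i ll rest

def find_all_anchor_lines (lines : List String) (anchors : List String) : List Int :=
  (PySem.List.enumerate lines).foldl
    (fun hits p => pvInnerA hits p.1 (PySem.Str.lower p.2) anchors) []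

-- ===== PORT B =====
-- outer 'for anchor in sorted(dict.fromkeys(anchors), key=len): if not remaining: break;
-- if anchor not in big: continue; <inner sweep>; rebuild big' over the state (hits, (remaining, big))
def pvOuterB : List String → List Int × (List (Int × String) × String) → List Int × (List (Int × String) × String)
  | [], st => st
  | anchor :: rest, st =>
    if st.2.1 = [] then st
    else if !PySem.Str.isIn anchor st.2.2 then pvOuterB rest st
    else
      let sw := st.2.1.foldl
        (fun st2 p =>
          if PySem.Str.isIn anchor p.2 then (st2.1 ++ [p.1], st2.2)
          else (st2.1, st2.2 ++ [p]))
        (st.1, [])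
      pvOuterB rest (sw.1, (sw.2, PySem.Str.join "\x00" (sw.2.map (fun p => p.2))))

def find_all_anchor_lines_alt (lines : List String) (anchors : List String) : List Int :=
  let lowered := lines.map PySem.Str.lower
  let remaining := PySem.List.enumerate lowered
  let big := PySem.Str.join "\x00" lowered
  let ordered := PySem.List.sorted (PySem.List.dedup anchors) (fun s => PySem.Str.len s) false
  PySem.List.sorted (pvOuterB ordered ([], (remaining, big))).1 (fun x => x) false

-- ===== PRECONDITION & SPEC =====
def Spec_find_all_anchor_lines (lines : List String) (anchors : List String) (out : List Int) : Prop := out = find_all_anchor_lines_alt lines anchors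
instance (lines : List String) (anchors : List String) (out : List Int) : Decidable (Spec_find_all_anchor_lines lines anchors out) := by unfold Spec_find_all_anchor_lines; infer_instance

-- ===== CLAIM (what is proved, stated in full; the proofs are below) =====
def Claim_equal_find_all_anchor_lines : Prop := ∀ (lines : List String) (anchors : List String), Dom_find_all_anchor_lines lines anchors → Spec_find_all_anchor_lines lines anchors (find_all_anchor_lines lines anchors)

-- ===== LEMMAS AND PROOFS =====

-- A's inner loop appends i exactly when some anchor occurs in the lowered line.
theorem pvInnerA_eq (hits : List Int) (i : Int) (ll : String) (anchors : List String) :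
    pvInnerA hits i ll anchors =
      if anchors.any (fun a => PySem.Str.isIn a ll) then hits ++ [i] else hits := by
  induction anchors with
  | nil => simp [pvInnerA]
  | cons a rest ih =>
    simp only [pvInnerA, List.any_cons, ih, Bool.or_eq_true]
    split_ifs <;> tauto

-- an append-if fold emits the first components of the filtered list
theorem pv_foldl_if (P : String → Bool) :
    ∀ (l : List (Int × String)) (acc : List Int),
      l.foldl (fun hits p => if P p.2 then hits ++ [p.1] else hits) acc
        = acc ++ (l.filter (fun p => P p.2)).map (fun p => p.1) := by
  intro l
  induction l with
  | nil => intro acc; simp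
  | cons x xs ih =>
    intro acc
    by_cases h : P x.2 <;> simp [h, ih]

-- A collects, in order, the indices of the lines matched by some anchor.
theorem pvA_eq (lines anchors : List String) :
    find_all_anchor_lines lines anchors
      = ((PySem.List.enumerate lines).filter
          (fun p => anchors.any (fun a => PySem.Str.isIn a (PySem.Str.lower p.2)))).map
          (fun p => p.1) := by
  unfold find_all_anchor_lines
  have h : (fun (hits : List Int) (p : Int × String) =>
        pvInnerA hits p.1 (PySem.Str.lower p.2) anchors)
      = fun hits p =>
        if anchors.any (fun a => PySem.Str.isIn a (PySem.Str.lower p.2)) then hits ++ [p.1]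
        else hits := by
    funext hits p
    exact pvInnerA_eq hits p.1 (PySem.Str.lower p.2) anchors
  rw [h, pv_foldl_if (fun ll => anchors.any (fun a => PySem.Str.isIn a (PySem.Str.lower ll)))]
  simp

-- B's inner sweep splits the remaining lines into hits and survivors
theorem pv_split (anchor : String) :
    ∀ (rem : List (Int × String)) (hits : List Int) (still : List (Int × String)),
      rem.foldl
        (fun st2 p =>
          if PySem.Str.isIn anchor p.2 then (st2.1 ++ [p.1], st2.2)
          else (st2.1, st2.2 ++ [p]))
        (hits, still)
      = (hits ++ (rem.filter (fun p => PySem.Str.isIn anchor p.2)).map (fun p => p.1),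
         still ++ rem.filter (fun p => !PySem.Str.isIn anchor p.2)) := by
  intro rem
  induction rem with
  | nil => intro hits still; simp
  | cons x xs ih =>
    intro hits still
    rw [List.foldl_cons]
    by_cases h : PySem.Str.isIn anchor x.2 = true
    · rw [if_pos h, ih, List.filter_cons, List.filter_cons, h]
      simp
    · rw [Bool.not_eq_true] at h
      rw [h, if_neg (by simp), List.filter_cons, List.filter_cons, h, ih]
      simp

-- survivors of one filter, re-filtered, recombine into one filter (up to permutation)
theorem pv_filter_perm {α : Type} (p q : α → Bool) (l : List α) :
    (l.filter p ++ (l.filter (fun x => !p x)).filter q).Perm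
      (l.filter (fun x => p x || q x)) := by
  induction l with
  | nil => simp
  | cons x xs ih =>
    by_cases hp : p x = true
    · simpa [hp] using ih.cons x
    · rw [Bool.not_eq_true] at hp
      by_cases hq : q x = true
      · simp only [List.filter_cons, hp, hq, Bool.not_false, Bool.false_or,
          Bool.false_eq_true, if_false, if_true]
        exact List.perm_middle.trans (ih.cons x)
      · rw [Bool.not_eq_true] at hq
        simpa [hp, hq] using ih

-- every member of a joined list is an infix of the join
theorem pv_infix_join_chars (sep : List Char) :
    ∀ (parts : List (List Char)) (cs : List Char), cs ∈ parts →
      cs <:+: PySem.Chars.join sep parts := by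
  intro parts
  induction parts with
  | nil => intro cs h; cases h
  | cons x xs ih =>
    intro cs h
    cases xs with
    | nil =>
      rw [List.mem_singleton] at h
      subst h
      rw [PySem.Chars.join_singleton]
    | cons y r =>
      rw [PySem.Chars.join_cons_cons]
      rcases List.mem_cons.mp h with h | h
      · subst h
        rw [List.append_assoc]
        exact (List.prefix_append cs _).isInfix
      · exact (ih cs h).trans (List.suffix_append _ _).isInfix

theorem pv_infix_join (sep : String) (parts : List String) (ll : String)
    (h : ll ∈ parts) : ll.toList <:+: (PySem.Str.join sep parts).toList := by
  rw [PySem.Str.toList_join]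
  exact pv_infix_join_chars sep.toList (parts.map String.toList) ll.toList
    (List.mem_map_of_mem h)

-- if an anchor misses the joined remaining text, it misses every remaining line
theorem pv_prefilter (a big : String) (p2 : String)
    (hinf : p2.toList <:+: big.toList)
    (hmiss : PySem.Str.isIn a big = false) :
    PySem.Str.isIn a p2 = false := by
  by_contra h
  rw [Bool.not_eq_false, PySem.Str.isIn_iff_infix] at h
  have : PySem.Str.isIn a big = true :=
    (PySem.Str.isIn_iff_infix a big).mpr (h.trans hinf)
  rw [hmiss] at this
  cases this

-- B's outer loop: its hits are, up to order, the indices of the matched remaining lines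
-- (the invariant: every remaining line is an infix of the joined prefilter text)
theorem pvOuterB_perm :
    ∀ (anchors : List String) (hits : List Int) (rem : List (Int × String)) (big : String),
      (∀ p ∈ rem, p.2.toList <:+: big.toList) →
      (pvOuterB anchors (hits, (rem, big))).1.Perm
        (hits ++ (rem.filter
          (fun p => anchors.any (fun a => PySem.Str.isIn a p.2))).map (fun p => p.1)) := by
  intro anchors
  induction anchors with
  | nil => intro hits rem big _; simp [pvOuterB]
  | cons a rest ih =>
    intro hits rem big hinv
    by_cases hr : rem = []
    · subst hr; simp [pvOuterB]
    · by_cases hpre : PySem.Str.isIn a big = false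
      · have hpre0 : PySem.Chars.isIn a.toList big.toList = false := by
          simpa using hpre
        rw [show pvOuterB (a :: rest) (hits, (rem, big)) = pvOuterB rest (hits, (rem, big))
            from by simp [pvOuterB, hr, hpre0]]
        refine (ih hits rem big hinv).trans ?_
        have hfe : rem.filter (fun p => rest.any (fun an => PySem.Str.isIn an p.2))
            = rem.filter (fun p => (a :: rest).any (fun an => PySem.Str.isIn an p.2)) := by
          refine List.filter_congr ?_
          intro p hp
          rw [List.any_cons, pv_prefilter a big p.2 (hinv p hp) hpre, Bool.false_or]
        rw [hfe]
      · rw [Bool.not_eq_false] at hpre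
        have hpre' : PySem.Chars.isIn a.toList big.toList = true := by
          simpa using hpre
        rw [show pvOuterB (a :: rest) (hits, (rem, big))
            = pvOuterB rest
                ((rem.foldl
                  (fun st2 p =>
                    if PySem.Str.isIn a p.2 then (st2.1 ++ [p.1], st2.2)
                    else (st2.1, st2.2 ++ [p]))
                  (hits, [])).1,
                 ((rem.foldl
                  (fun st2 p =>
                    if PySem.Str.isIn a p.2 then (st2.1 ++ [p.1], st2.2)
                    else (st2.1, st2.2 ++ [p]))
                  (hits, [])).2,
                  PySem.Str.join "\x00"
                    (((rem.foldl
                      (fun st2 p =>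
                        if PySem.Str.isIn a p.2 then (st2.1 ++ [p.1], st2.2)
                        else (st2.1, st2.2 ++ [p]))
                      (hits, [])).2).map (fun p => p.2))))
            from by simp [pvOuterB, hr, hpre']]
        rw [pv_split]
        have hinv' : ∀ p ∈ rem.filter (fun p => !PySem.Str.isIn a p.2),
            p.2.toList <:+:
              (PySem.Str.join "\x00"
                ((rem.filter (fun p => !PySem.Str.isIn a p.2)).map
                  (fun q : Int × String => q.2))).toList := by
          intro p hp
          exact pv_infix_join _ _ _ (List.mem_map_of_mem hp)
        refine (ih _ _ _ hinv').trans ?_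
        rw [List.nil_append, List.append_assoc]
        refine List.Perm.append_left hits ?_
        have hperm := (pv_filter_perm
          (fun p : Int × String => PySem.Str.isIn a p.2)
          (fun p : Int × String => rest.any (fun an => PySem.Str.isIn an p.2)) rem).map
          (fun p : Int × String => p.1)
        simpa [List.map_append, List.any_cons] using hperm

-- A's output is strictly increasing
theorem pvA_pairwise (lines anchors : List String) :
    (find_all_anchor_lines lines anchors).Pairwise (· < ·) := by
  rw [pvA_eq]
  refine List.pairwise_map.mpr ?_
  exact (PySem.List.pairwise_lt_enumerate lines 0).filter _

-- enumerate after a map keeps indices and maps the values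
theorem pv_enum_map (f : String → String) :
    ∀ (xs : List String) (s : Int),
      PySem.List.enumerate (xs.map f) s
        = (PySem.List.enumerate xs s).map (fun p => (p.1, f p.2)) := by
  intro xs
  induction xs with
  | nil => intro s; simp [PySem.List.enumerate_nil]
  | cons x xs ih => intro s; simp [PySem.List.enumerate_cons, ih]

theorem pv_mem_of_mem_enumerate (xs : List String) (s : Int) (p : Int × String)
    (h : p ∈ PySem.List.enumerate xs s) : p.2 ∈ xs := by
  rcases (PySem.List.mem_enumerate_iff xs s p).mp h with ⟨k, hk, hp⟩
  subst hp
  exact List.getElem_mem hk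

theorem pv_main (lines anchors : List String) :
    find_all_anchor_lines lines anchors = find_all_anchor_lines_alt lines anchors := by
  have halt : find_all_anchor_lines_alt lines anchors
      = PySem.List.sorted
          (pvOuterB (PySem.List.sorted (PySem.List.dedup anchors) (fun s => PySem.Str.len s) false)
            ([], (PySem.List.enumerate (lines.map PySem.Str.lower),
                  PySem.Str.join "\x00" (lines.map PySem.Str.lower)))).1
          (fun x => x) false := rfl
  have hinv : ∀ p ∈ PySem.List.enumerate (lines.map PySem.Str.lower) (0 : Int),
      p.2.toList <:+: (PySem.Str.join "\x00" (lines.map PySem.Str.lower)).toList := by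
    intro p hp
    exact pv_infix_join _ _ _ (pv_mem_of_mem_enumerate _ _ _ hp)
  have hperm := pvOuterB_perm
    (PySem.List.sorted (PySem.List.dedup anchors) (fun s => PySem.Str.len s) false) []
    (PySem.List.enumerate (lines.map PySem.Str.lower))
    (PySem.Str.join "\x00" (lines.map PySem.Str.lower)) hinv
  -- the processed anchor list is a reordering of the distinct anchors: same matches
  have hany : ∀ p : Int × String,
      (PySem.List.sorted (PySem.List.dedup anchors) (fun s => PySem.Str.len s) false).any
        (fun a => PySem.Str.isIn a p.2)
      = anchors.any (fun a => PySem.Str.isIn a p.2) := by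
    intro p
    rcases h : anchors.any (fun a => PySem.Str.isIn a p.2) with _ | _
    · rw [List.any_eq_false] at h ⊢
      intro a ha
      exact h a ((PySem.List.mem_dedup _ _).mp ((PySem.List.mem_sorted _ _ _ _).mp ha))
    · rw [List.any_eq_true] at h ⊢
      rcases h with ⟨a, ha, hin⟩
      exact ⟨a, (PySem.List.mem_sorted _ _ _ _).mpr ((PySem.List.mem_dedup _ _).mpr ha), hin⟩
  have hfe :
      (PySem.List.enumerate (lines.map PySem.Str.lower)).filter
        (fun p => (PySem.List.sorted (PySem.List.dedup anchors)
          (fun s => PySem.Str.len s) false).any (fun a => PySem.Str.isIn a p.2))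
      = (PySem.List.enumerate (lines.map PySem.Str.lower)).filter
        (fun p => anchors.any (fun a => PySem.Str.isIn a p.2)) := by
    exact List.filter_congr (fun p _ => hany p)
  rw [hfe] at hperm
  have hfilters :
      (((PySem.List.enumerate (lines.map PySem.Str.lower)).filter
        (fun p => anchors.any (fun a => PySem.Str.isIn a p.2))).map (fun p => p.1))
      = find_all_anchor_lines lines anchors := by
    rw [pvA_eq, pv_enum_map PySem.Str.lower lines 0, List.filter_map, List.map_map]
    rfl
  rw [List.nil_append, hfilters] at hperm
  rw [halt]
  exact (PySem.List.sorted_eq_of_perm_of_pairwise_lt _ _ (fun x => x) hperm.symm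
    (pvA_pairwise lines anchors)).symm

-- ===== VERDICT (by name: the statement is the Claim_ definition above) =====
theorem find_all_anchor_lines_spec : Claim_equal_find_all_anchor_lines := by
  intro lines anchors _
  unfold Spec_find_all_anchor_lines
  exact pv_main lines anchors
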